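-- pv_equiv track=rewrite | github.com/Bparsons0904/NFL-Scheduler | nfl.py | weeklyGames
-- ===== SOURCE A (Python) =====
-- def weeklyGames(games):
--     testList = games
--     weekSchedule = []
--     weekTeams = []
--     for game in testList:
--         if game[0] not in weekTeams and game[1] not in weekTeams:
--             weekSchedule.append(game)
--             for team in game:
--                 weekTeams.append(team)
--     for games in weekSchedule:
--         if games in testList:
--             testList.remove(games)
--     return weekSchedule, testList
-- ===== SOURCE B (Python) =====
-- def weeklyGames(games):
--     weekSchedule = []
--     weekTeams = []
--     remaining = []
--     for game in games:
--         if game[0] not in weekTeams and game[1] not in weekTeams: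
--             weekSchedule.append(game)
--             weekTeams.extend(game)
--         else:
--             remaining.append(game)
--     games[:] = remaining
--     return weekSchedule, games
-- ===== Notes on version B (the rewrite author's own statement) =====
-- stated objective: simpler
-- what changed: Single pass that builds the remaining list directly as the complement of the selected games, replacing A's second loop over weekSchedule that does a membership test plus list.remove on the original list per selected game.
import Mathlib
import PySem

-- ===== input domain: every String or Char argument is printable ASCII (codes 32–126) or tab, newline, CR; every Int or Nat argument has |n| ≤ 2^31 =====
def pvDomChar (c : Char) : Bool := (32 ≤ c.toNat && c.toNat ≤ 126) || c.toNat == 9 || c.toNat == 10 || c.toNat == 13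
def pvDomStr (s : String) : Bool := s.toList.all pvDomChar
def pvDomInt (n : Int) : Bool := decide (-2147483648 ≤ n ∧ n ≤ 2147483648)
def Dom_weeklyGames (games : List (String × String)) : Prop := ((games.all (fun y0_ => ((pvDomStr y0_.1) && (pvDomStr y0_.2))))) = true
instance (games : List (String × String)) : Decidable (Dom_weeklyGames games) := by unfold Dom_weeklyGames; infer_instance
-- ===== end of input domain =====

-- B is simpler: it builds the remaining list directly in the single selection pass, instead of
-- A's second loop over weekSchedule doing a membership test + list.remove. Return-value equivalence
-- is proved; both Pythons also mutate the argument list in place to the same remaining list.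

-- ===== PORT A =====
-- first loop: fold over games with state (weekSchedule, weekTeams)
def pvStepA (st : List (String × String) × List String) (game : String × String) :
    List (String × String) × List String :=
  if game.1 ∉ st.2 ∧ game.2 ∉ st.2 then
    (st.1 ++ [game], st.2 ++ [game.1, game.2])
  else st

-- second loop: for games in weekSchedule: if games in testList: testList.remove(games)
def pvRemStep (t : List (String × String)) (g : String × String) : List (String × String) :=
  if g ∈ t then (PySem.List.remove? t g).getD t else t

def weeklyGames (games : List (String × String)) :
    (List (String × String)) × (List (String × String)) :=
  let testList := games
  let st := testList.foldl pvStepA ([], [])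
  let weekSchedule := st.1
  let testList := weekSchedule.foldl pvRemStep testList
  (weekSchedule, testList)

-- ===== PORT B =====
-- single pass with state (weekSchedule, weekTeams, remaining)
def pvStepB (st : List (String × String) × List String × List (String × String))
    (game : String × String) :
    List (String × String) × List String × List (String × String) :=
  if game.1 ∉ st.2.1 ∧ game.2 ∉ st.2.1 then
    (st.1 ++ [game], st.2.1 ++ [game.1, game.2], st.2.2)
  else (st.1, st.2.1, st.2.2 ++ [game])

def weeklyGames_alt (games : List (String × String)) :
    (List (String × String)) × (List (String × String)) :=
  let st := games.foldl pvStepB ([], [], [])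
  (st.1, st.2.2)

-- ===== PRECONDITION & SPEC =====
def Spec_weeklyGames (games : List (String × String)) (out : (List (String × String)) × (List (String × String))) : Prop := out = weeklyGames_alt games
instance (games : List (String × String)) (out : (List (String × String)) × (List (String × String))) : Decidable (Spec_weeklyGames games out) := by unfold Spec_weeklyGames; infer_instance

-- ===== CLAIM (what is proved, stated in full; the proofs are below) =====
def Claim_equal_weeklyGames : Prop := ∀ (games : List (String × String)), Dom_weeklyGames games → Spec_weeklyGames games (weeklyGames games)

-- ===== LEMMAS AND PROOFS =====

-- recursive characterisation of the selected list (given current teams)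
def pvSel (ts : List String) : List (String × String) → List (String × String)
  | [] => []
  | g :: gs => if g.1 ∉ ts ∧ g.2 ∉ ts then g :: pvSel (ts ++ [g.1, g.2]) gs else pvSel ts gs

-- recursive characterisation of the remaining list (given current teams)
def pvRem (ts : List String) : List (String × String) → List (String × String)
  | [] => []
  | g :: gs => if g.1 ∉ ts ∧ g.2 ∉ ts then pvRem (ts ++ [g.1, g.2]) gs else g :: pvRem ts gs

theorem pvFoldA_eq (gs : List (String × String)) :
    ∀ ws ts, gs.foldl pvStepA (ws, ts) = (ws ++ pvSel ts gs, (gs.foldl pvStepA (ws, ts)).2) := by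
  induction gs with
  | nil => intro ws ts; simp [pvSel]
  | cons g gs ih =>
    intro ws ts
    simp only [List.foldl_cons, pvStepA, pvSel]
    by_cases h : g.1 ∉ ts ∧ g.2 ∉ ts
    · simp only [if_pos h]
      rw [ih (ws ++ [g]) (ts ++ [g.1, g.2])]
      simp
    · simp only [if_neg h]
      exact ih ws ts

theorem pvFoldB_eq (gs : List (String × String)) :
    ∀ ws ts rem, gs.foldl pvStepB (ws, ts, rem) =
      (ws ++ pvSel ts gs, (gs.foldl pvStepB (ws, ts, rem)).2.1, rem ++ pvRem ts gs) := by
  induction gs with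
  | nil => intro ws ts rem; simp [pvSel, pvRem]
  | cons g gs ih =>
    intro ws ts rem
    simp only [List.foldl_cons, pvStepB, pvSel, pvRem]
    by_cases h : g.1 ∉ ts ∧ g.2 ∉ ts
    · simp only [if_pos h]
      rw [ih (ws ++ [g]) (ts ++ [g.1, g.2]) rem]
      simp
    · simp only [if_neg h]
      rw [ih ws ts (rem ++ [g])]
      simp

-- every selected game's teams are absent from the starting teams list
theorem pvSel_teams (gs : List (String × String)) :
    ∀ ts s, s ∈ pvSel ts gs → s.1 ∉ ts ∧ s.2 ∉ ts := by
  induction gs with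
  | nil => intro ts s h; simp [pvSel] at h
  | cons g gs ih =>
    intro ts s h
    simp only [pvSel] at h
    by_cases hc : g.1 ∉ ts ∧ g.2 ∉ ts
    · rw [if_pos hc] at h
      rcases List.mem_cons.mp h with h | h
      · subst h; exact hc
      · have := ih _ _ h
        constructor
        · intro hm; exact this.1 (by simp [hm])
        · intro hm; exact this.2 (by simp [hm])
    · rw [if_neg hc] at h
      exact ih _ _ h

-- removals of elements all different from the head pass over the head
theorem pvRemFold_cons (L : List (String × String)) :
    ∀ g gs, (∀ s ∈ L, s ≠ g) → L.foldl pvRemStep (g :: gs) = g :: L.foldl pvRemStep gs := by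
  induction L with
  | nil => intro g gs _; rfl
  | cons s L ih =>
    intro g gs hne
    have hsg : s ≠ g := hne s (by simp)
    simp only [List.foldl_cons, pvRemStep]
    by_cases hm : s ∈ gs
    · rw [if_pos (by simp [hm]), if_pos hm]
      rw [PySem.List.remove?_eq_some_erase gs s hm,
        PySem.List.remove?_eq_some_erase (g :: gs) s (List.mem_cons_of_mem g hm)]
      simp only [Option.getD_some]
      rw [List.erase_cons_tail (by simp [Ne.symm hsg])]
      exact ih g (gs.erase s) (fun x hx => hne x (by simp [hx]))
    · have hs : s ∉ g :: gs := by
        intro h; rcases List.mem_cons.mp h with h | h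
        · exact hsg h
        · exact hm h
      rw [if_neg hs, if_neg hm]
      exact ih g gs (fun x hx => hne x (by simp [hx]))

-- main loop invariant: the second loop of A applied to the original list gives B's remaining list
theorem pvMain (gs : List (String × String)) :
    ∀ ts, (pvSel ts gs).foldl pvRemStep gs = pvRem ts gs := by
  induction gs with
  | nil => intro ts; simp [pvSel, pvRem]
  | cons g gs ih =>
    intro ts
    simp only [pvSel, pvRem]
    by_cases h : g.1 ∉ ts ∧ g.2 ∉ ts
    · rw [if_pos h, if_pos h]
      simp only [List.foldl_cons, pvRemStep]
      rw [if_pos (List.mem_cons_self), PySem.List.remove?_cons_self]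
      simpa using ih (ts ++ [g.1, g.2])
    · rw [if_neg h, if_neg h]
      have hne : ∀ s ∈ pvSel ts gs, s ≠ g := by
        intro s hs hsg
        subst hsg
        exact h (pvSel_teams gs ts s hs)
      rw [pvRemFold_cons _ g gs hne, ih ts]

-- ===== VERDICT (by name: the statement is the Claim_ definition above) =====
theorem weeklyGames_spec : Claim_equal_weeklyGames := by
  intro games _
  unfold Spec_weeklyGames
  simp only [weeklyGames, weeklyGames_alt]
  rw [pvFoldA_eq games [] [], pvFoldB_eq games [] [] []]
  simp only [List.nil_append]
  exact Prod.ext rfl (pvMain games [])
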